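-- pv_equiv track=rewrite | github.com/chlomcneill/advent-of-code-2015 | Day4/Day4Part1.py | double_letter_check
-- ===== SOURCE A (Python) =====
-- def double_letter_check(string):
--     double_letters = 0
--     prev = ''
--     for letter in string:
--         if letter == prev:
--             double_letters += 1
--         prev = letter
--     if double_letters > 0:
--         return True
--     else:
--         return False
-- ===== SOURCE B (Python) =====
-- from itertools import groupby
--
--
-- def double_letter_check(string):
--     return any(sum(1 for _ in g) > 1 for _, g in groupby(string))
-- ===== Notes on version B (the rewrite author's own statement) =====
-- stated objective: idiomatic
-- what changed: B partitions the input into maximal runs of equal consecutive characters with itertools.groupby and returns whether any run has length > 1, instead of A's loop carrying a prev variable and an integer counter of adjacent equal pairs.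
import Mathlib
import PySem

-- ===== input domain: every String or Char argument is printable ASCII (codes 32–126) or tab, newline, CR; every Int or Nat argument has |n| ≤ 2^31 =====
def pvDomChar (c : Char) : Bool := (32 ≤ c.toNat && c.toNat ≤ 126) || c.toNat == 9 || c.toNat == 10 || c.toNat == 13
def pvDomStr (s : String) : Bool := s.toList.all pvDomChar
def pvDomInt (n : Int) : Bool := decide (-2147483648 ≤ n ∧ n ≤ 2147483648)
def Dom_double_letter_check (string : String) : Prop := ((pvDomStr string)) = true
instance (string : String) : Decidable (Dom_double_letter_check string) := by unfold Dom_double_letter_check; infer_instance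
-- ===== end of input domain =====

-- B replaces A's prev/counter loop by itertools.groupby runs: any maximal run longer than 1 (idiomatic; same cost).

-- ===== PORT A =====
-- A: loop over the characters with state (double_letters, prev); prev starts as '' (no char,
-- ported as none — '' never equals a 1-char string), finally return double_letters > 0.
def pvStepA (st : Int × Option Char) (letter : Char) : Int × Option Char :=
  (if some letter == st.2 then st.1 + 1 else st.1, some letter)

def double_letter_check (string : String) : Bool :=
  if (string.toList.foldl pvStepA (0, none)).1 > 0 then true else false

-- ===== PORT B =====
-- B-side helper: itertools.groupby — maximal runs of equal consecutive characters.
def pvRuns : List Char → List (List Char)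
  | [] => []
  | c :: cs =>
    match pvRuns cs with
    | (d :: ds) :: rest => if c == d then (c :: d :: ds) :: rest else [c] :: (d :: ds) :: rest
    | rs => [c] :: rs

def double_letter_check_alt (string : String) : Bool :=
  (pvRuns string.toList).any (fun g => g.length > 1)

-- ===== PRECONDITION & SPEC =====
def Spec_double_letter_check (string : String) (out : Bool) : Prop := out = double_letter_check_alt string
instance (string : String) (out : Bool) : Decidable (Spec_double_letter_check string out) := by unfold Spec_double_letter_check; infer_instance

-- ===== CLAIM (what is proved, stated in full; the proofs are below) =====
def Claim_equal_double_letter_check : Prop := ∀ (string : String), Dom_double_letter_check string → Spec_double_letter_check string (double_letter_check string)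

-- ===== LEMMAS AND PROOFS =====

-- reference predicate: some adjacent pair of equal characters
def pvHasAdj : List Char → Bool
  | [] => false
  | [_] => false
  | a :: b :: t => (a == b) || pvHasAdj (b :: t)

-- A's counter seen as a recursion on (prev, rest)
def pvAdjFrom (p : Option Char) : List Char → Bool
  | [] => false
  | c :: cs => (some c == p) || pvAdjFrom (some c) cs

lemma foldA_shift (l : List Char) (k : Int) (p : Option Char) :
    (l.foldl pvStepA (k, p)).1 = k + (l.foldl pvStepA (0, p)).1 := by
  induction l generalizing k p with
  | nil => simp
  | cons c cs ih =>
    simp only [List.foldl_cons, pvStepA]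
    rw [ih, ih (if some c == p then (0:Int) + 1 else 0)]
    split_ifs <;> ring

lemma foldA_nonneg (l : List Char) (p : Option Char) :
    0 ≤ (l.foldl pvStepA (0, p)).1 := by
  induction l generalizing p with
  | nil => simp
  | cons c cs ih =>
    simp only [List.foldl_cons, pvStepA]
    rw [foldA_shift]
    have := ih (some c)
    split_ifs <;> omega

lemma foldA_pos (l : List Char) (p : Option Char) :
    ((l.foldl pvStepA (0, p)).1 > 0) = (pvAdjFrom p l = true) := by
  induction l generalizing p with
  | nil => simp [pvAdjFrom]
  | cons c cs ih =>
    simp only [List.foldl_cons, pvStepA, pvAdjFrom]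
    rw [foldA_shift]
    have hn := foldA_nonneg cs (some c)
    by_cases hc : (some c == p) = true
    · rw [if_pos hc]
      simp only [hc, Bool.true_or, eq_iff_iff, iff_true]
      omega
    · rw [if_neg hc]
      simp only [hc, Bool.false_or, zero_add]
      exact ih (some c)

lemma adjFrom_some (l : List Char) (a : Char) :
    pvAdjFrom (some a) l = pvHasAdj (a :: l) := by
  induction l generalizing a with
  | nil => simp [pvAdjFrom, pvHasAdj]
  | cons d t ih =>
    simp only [pvAdjFrom, pvHasAdj, ih d]
    congr 1
    simp [BEq.comm]

lemma adjFrom_none (l : List Char) : pvAdjFrom none l = pvHasAdj l := by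
  cases l with
  | nil => rfl
  | cons c cs =>
    simp only [pvAdjFrom, adjFrom_some]
    simp

lemma pvRuns_head (c : Char) (cs : List Char) :
    ∃ r rest, pvRuns (c :: cs) = (c :: r) :: rest := by
  rw [pvRuns]
  rcases h : pvRuns cs with _ | ⟨_ | ⟨d, ds⟩, rest⟩
  · exact ⟨[], [], rfl⟩
  · exact ⟨[], [] :: rest, rfl⟩
  · by_cases hc : (c == d) = true
    · exact ⟨d :: ds, rest, by simp [hc]⟩
    · exact ⟨[], (d :: ds) :: rest, by simp [hc]⟩

lemma runs_any (l : List Char) :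
    (pvRuns l).any (fun g => g.length > 1) = pvHasAdj l := by
  induction l with
  | nil => rfl
  | cons c cs ih =>
    cases cs with
    | nil => rfl
    | cons d t =>
      obtain ⟨r, rest, hr⟩ := pvRuns_head d t
      rw [pvRuns, hr]
      cases hc : (c == d) with
      | true => simp [pvHasAdj, hc]
      | false => simp [pvHasAdj, hc, ← hr, ih]

-- ===== VERDICT (by name: the statement is the Claim_ definition above) =====
theorem double_letter_check_spec : Claim_equal_double_letter_check := by
  intro s _
  unfold Spec_double_letter_check double_letter_check double_letter_check_alt
  rw [runs_any, ← adjFrom_none]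
  have h := foldA_pos s.toList none
  by_cases hp : (s.toList.foldl pvStepA (0, none)).1 > 0
  · rw [if_pos hp]
    exact (h ▸ hp).symm
  · rw [if_neg hp]
    exact ((Bool.not_eq_true _).mp (h ▸ hp)).symm
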